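-- pv_equiv track=rewrite | github.com/JoonyeolDev/codingtest | Programers/lv2/nxn_배열_자르기.py | solution
-- ===== SOURCE A (Python) =====
-- def solution(n, left, right):
--     left_div, left_mod = divmod(left, n)
--     right_div, _ = divmod(right, n)
--     arr = []
--     for i in range(left_div+1, right_div+2):
--         arr += [i if j <= i else j for j in range(1,n+1)]
--     answer = arr[left_mod:left_mod+right-left+1]
--     return answer
-- ===== SOURCE B (Python) =====
-- def solution(n, left, right):
--     return [max(p // n, p % n) + 1 for p in range(left, right + 1)]
-- ===== Notes on version B (the rewrite author's own statement) =====
-- stated objective: simpler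
-- what changed: Instead of materialising whole rows of the n-by-n max pattern with a row loop and then slicing, B computes each requested element directly by the closed form max(p//n, p%n)+1 for p in [left, right], in a one-line comprehension.
-- outside the precondition, e.g. on solution(0, 0, 1): A raises ZeroDivisionError, B raises ZeroDivisionError; on solution(-2, 0, 1): A returns [], B returns [1, 0]
import Mathlib
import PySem

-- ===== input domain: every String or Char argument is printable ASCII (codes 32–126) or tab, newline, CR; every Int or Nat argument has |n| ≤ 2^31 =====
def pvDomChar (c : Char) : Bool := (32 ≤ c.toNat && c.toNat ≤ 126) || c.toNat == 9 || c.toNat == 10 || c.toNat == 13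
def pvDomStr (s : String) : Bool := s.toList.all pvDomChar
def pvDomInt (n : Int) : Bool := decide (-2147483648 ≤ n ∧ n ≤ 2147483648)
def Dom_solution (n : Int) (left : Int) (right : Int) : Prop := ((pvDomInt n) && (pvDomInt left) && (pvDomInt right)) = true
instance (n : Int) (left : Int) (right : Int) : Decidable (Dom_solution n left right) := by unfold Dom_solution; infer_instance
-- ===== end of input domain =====

-- B replaces A's row-building loop + slice with the closed form max(p//n, p%n)+1 per requested index (simpler: a one-line comprehension, no intermediate array).


-- ===== PORT A =====
def solution (n : Int) (left : Int) (right : Int) : List Int :=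
  match PySem.Int.divmod? left n, PySem.Int.divmod? right n with
  | some (left_div, left_mod), some (right_div, _) =>
    let arr : List Int :=
      (PySem.List.pyRange (left_div + 1) (right_div + 2) 1).foldl
        (fun acc i =>
          acc ++ (PySem.List.pyRange 1 (n + 1) 1).map (fun j => if j ≤ i then i else j)) []
    PySem.List.slice arr (some left_mod) (some (left_mod + right - left + 1))
  | _, _ => []  -- n = 0: divmod raises ZeroDivisionError; excluded by Pre_solution

-- ===== PORT B =====
def solution_alt (n : Int) (left : Int) (right : Int) : List Int :=
  (PySem.List.pyRange left (right + 1) 1).map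
    (fun p => max (PySem.Int.floordiv p n) (PySem.Int.mod p n) + 1)

-- ===== PRECONDITION & SPEC =====
-- Pre_solution restricts to the problem's natural domain n >= 1 (an n-by-n array): at n = 0 A
-- raises ZeroDivisionError, and for n < 0 A's empty result is an artefact of range(1, n+1)
-- being empty, which B's closed form has no reason to reproduce.
def Pre_solution (n : Int) (left : Int) (right : Int) : Prop := 1 ≤ n
instance (n : Int) (left : Int) (right : Int) : Decidable (Pre_solution n left right) := by
  unfold Pre_solution; infer_instance
def pvWitness_solution : Int × Int × Int := (4, 7, 14)
def Spec_solution (n : Int) (left : Int) (right : Int) (out : List Int) : Prop :=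
  out = solution_alt n left right
instance (n : Int) (left : Int) (right : Int) (out : List Int) : Decidable (Spec_solution n left right out) := by
  unfold Spec_solution; infer_instance

-- ===== CLAIM (what is proved, stated in full; the proofs are below) =====
def Claim_equal_solution : Prop := ∀ (n : Int) (left : Int) (right : Int),
  Dom_solution n left right → Pre_solution n left right →
  Spec_solution n left right (solution n left right)

-- ===== LEMMAS AND PROOFS =====

-- one row of A's pattern equals the closed form over the corresponding index block
lemma row_eq (n i : Int) (hn : 1 ≤ n) :
    (PySem.List.pyRange 1 (n + 1) 1).map (fun j => if j ≤ i then i else j)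
      = (PySem.List.pyRange ((i - 1) * n) (i * n) 1).map
          (fun p => max (PySem.Int.floordiv p n) (PySem.Int.mod p n) + 1) := by
  apply List.ext_getElem
  · simp [PySem.List.length_pyRange_one]
    congr 1
    nlinarith
  · intro k h1 h2
    simp only [List.getElem_map, PySem.List.getElem_pyRange_one]
    have hk : (k : Int) < n := by
      have := h1; simp [PySem.List.length_pyRange_one] at this; omega
    have hfd : PySem.Int.floordiv ((i - 1) * n + (k : Int)) n = i - 1 := by
      rw [PySem.Int.floordiv_eq_iff_of_pos (by omega)]
      constructor
      · omega
      · nlinarith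
    have hmod : PySem.Int.mod ((i - 1) * n + (k : Int)) n = (k : Int) := by
      have h := PySem.Int.floordiv_mul_add_mod ((i - 1) * n + (k : Int)) n
      rw [hfd] at h; linarith
    rw [hfd, hmod]
    split_ifs <;> omega

lemma flat_eq (n : Int) (hn : 1 ≤ n) (a : Int) (m : Nat) :
    (PySem.List.pyRange (a + 1) (a + 1 + m) 1).flatMap
        (fun i => (PySem.List.pyRange 1 (n + 1) 1).map (fun j => if j ≤ i then i else j))
      = (PySem.List.pyRange (a * n) ((a + m) * n) 1).map
          (fun p => max (PySem.Int.floordiv p n) (PySem.Int.mod p n) + 1) := by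
  induction m with
  | zero => simp [PySem.List.pyRange_one_eq_nil]
  | succ m ih =>
    have h1 : a + 1 + ((m + 1 : Nat) : Int) = (a + 1 + m) + 1 := by push_cast; ring
    rw [h1, PySem.List.pyRange_one_succ_right (a := a + 1) (b := a + 1 + (m : Int)) (by omega), List.flatMap_append, ih,
        List.flatMap_singleton]
    have h2 : (a + 1 + (m : Int)) - 1 = a + m := by ring
    rw [row_eq n (a + 1 + m) hn, h2]
    have h3 : (a + 1 + (m : Int)) * n = (a + ((m + 1 : Nat) : Int)) * n := by push_cast; ring
    rw [h3, ← List.map_append, ← PySem.List.pyRange_one_append (a * n) ((a + m) * n) _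
        (by nlinarith) (by nlinarith)]

-- A = B for n >= 1
lemma solution_eq (n left right : Int) (hn : 1 ≤ n) :
    solution n left right = solution_alt n left right := by
  unfold solution solution_alt

  have hn0 : n ≠ 0 := by omega
  simp only [PySem.Int.divmod?, if_neg hn0]
  set ld := PySem.Int.floordiv left n with hld
  set lm := PySem.Int.mod left n with hlm
  set rd := PySem.Int.floordiv right n with hrd
  have e1 : left.fdiv n = ld := rfl
  have e2 : left.fmod n = lm := rfl
  have e3 : right.fdiv n = rd := rfl
  rw [e1, e2, e3]
  have hleft : ld * n + lm = left := PySem.Int.floordiv_mul_add_mod left n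
  have hlm0 : 0 ≤ lm := PySem.Int.mod_nonneg left (by omega)
  have hlmn : lm < n := PySem.Int.mod_lt left (by omega)
  have hright : rd * n + PySem.Int.mod right n = right := PySem.Int.floordiv_mul_add_mod right n
  have hrm0 : 0 ≤ PySem.Int.mod right n := PySem.Int.mod_nonneg right (by omega)
  have hrmn : PySem.Int.mod right n < n := PySem.Int.mod_lt right (by omega)
  rw [PySem.List.foldl_append_eq_flatMap, List.nil_append]
  by_cases hcase : rd < ld
  · -- loop range empty: both sides are []
    have harr : PySem.List.pyRange (ld + 1) (rd + 2) 1 = [] :=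
      PySem.List.pyRange_one_eq_nil (by omega)
    have hright_lt : right + 1 ≤ left := by nlinarith
    rw [harr, List.flatMap_nil, PySem.List.pyRange_one_eq_nil (by omega), List.map_nil]
    apply List.eq_nil_of_length_eq_zero
    have h1 := PySem.List.clampIdx_le 0 (lm + right - left + 1)
    have h2 := PySem.List.clampIdx_le 0 lm
    simp only [PySem.List.length_slice, List.length_nil]
    omega
  · -- at least one row
    push Not at hcase
    set m : Nat := (rd + 1 - ld).toNat with hm
    have hmc : (m : Int) = rd + 1 - ld := by omega
    have hrange : PySem.List.pyRange (ld + 1) (rd + 2) 1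
        = PySem.List.pyRange (ld + 1) (ld + 1 + (m : Int)) 1 := by rw [hmc]; ring_nf
    rw [hrange, flat_eq n hn ld m, hmc]
    have hldrd : (ld + (rd + 1 - ld)) * n = (rd + 1) * n := by ring_nf
    rw [hldrd]
    have hstop0 : 0 ≤ lm + right - left + 1 := by nlinarith
    rw [PySem.List.slice_toNat _ hlm0 hstop0]
    -- split the index range at `left`
    have hsplit1 : PySem.List.pyRange (ld * n) ((rd + 1) * n) 1
        = PySem.List.pyRange (ld * n) left 1 ++ PySem.List.pyRange left ((rd + 1) * n) 1 :=
      PySem.List.pyRange_one_append _ _ _ (by omega) (by nlinarith)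
    rw [hsplit1, List.map_append]
    rw [List.drop_left' (by simp [PySem.List.length_pyRange_one]; omega)]
    have hK : (lm + right - left + 1).toNat - lm.toNat = (right - left + 1).toNat := by omega
    rw [hK]
    by_cases hlr : left ≤ right + 1
    · have hsplit2 : PySem.List.pyRange left ((rd + 1) * n) 1
          = PySem.List.pyRange left (right + 1) 1 ++ PySem.List.pyRange (right + 1) ((rd + 1) * n) 1 :=
        PySem.List.pyRange_one_append _ _ _ hlr (by nlinarith)
      rw [hsplit2, List.map_append]
      exact List.take_left' (by simp [PySem.List.length_pyRange_one]; omega)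
    · push Not at hlr
      have h0 : (right - left + 1).toNat = 0 := by omega
      rw [h0, List.take_zero,
          PySem.List.pyRange_one_eq_nil (a := left) (b := right + 1) (by omega), List.map_nil]

-- ===== VERDICT (by name: the statement is the Claim_ definition above) =====
theorem solution_spec : Claim_equal_solution := by
  intro n left right _hdom hpre
  exact solution_eq n left right hpre
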